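-- pv_equiv track=rewrite | github.com/COSC-499-W2025/capstone-project-team-20 | src/api/routes.py | _author_matches_usernames
-- ===== SOURCE A (Python) =====
-- from typing import Any, List, Optional
--
-- def _extract_git_username(email: str) -> str:
--     local = (email or "").split("@", 1)[0].strip().lower()
--     if "+" in local:
--         suffix = local.split("+", 1)[1].strip()
--         if suffix:
--             return suffix
--     return local
--
-- def _author_matches_usernames(author_email: str, usernames: List[str]) -> bool:
--     if not usernames:
--         return True
--
--     email = (author_email or "").strip().lower()
--     if not email:
--         return False
--
--     local = email.split("@", 1)[0]
--     extracted_user = _extract_git_username(email)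
--     for candidate in usernames:
--         c = (candidate or "").strip().lower()
--         if not c:
--             continue
--         if c == email or c == local or c == extracted_user:
--             return True
--     return False
-- ===== SOURCE B (Python) =====
-- from typing import List
--
-- def _extract_git_username(email: str) -> str:
--     local = (email or "").split("@", 1)[0].strip().lower()
--     if "+" in local:
--         suffix = local.split("+", 1)[1].strip()
--         if suffix:
--             return suffix
--     return local
--
-- def _author_matches_usernames(author_email: str, usernames: List[str]) -> bool:
--     if not usernames:
--         return True
--     email = (author_email or "").strip().lower()
--     if not email:
--         return False
--     local = email.split("@", 1)[0]
--     extracted_user = _extract_git_username(email)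
--     # sort the normalized non-empty usernames once, then binary-search each target
--     cands = sorted(c for u in usernames if (c := (u or "").strip().lower()))
--
--     def found(t: str) -> bool:
--         lo, hi = 0, len(cands)
--         while lo < hi:
--             mid = (lo + hi) // 2
--             if cands[mid] < t:
--                 lo = mid + 1
--             else:
--                 hi = mid
--         return lo < len(cands) and cands[lo] == t
--
--     return found(email) or found(local) or found(extracted_user)
-- ===== Notes on version B (the rewrite author's own statement) =====
-- stated objective: alternative
-- what changed: Replaces A's linear scan that compares every normalized username against three targets by sorting the normalized usernames once and running a hand-written binary search (lower bound) for each of the three author variants.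
import Mathlib
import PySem

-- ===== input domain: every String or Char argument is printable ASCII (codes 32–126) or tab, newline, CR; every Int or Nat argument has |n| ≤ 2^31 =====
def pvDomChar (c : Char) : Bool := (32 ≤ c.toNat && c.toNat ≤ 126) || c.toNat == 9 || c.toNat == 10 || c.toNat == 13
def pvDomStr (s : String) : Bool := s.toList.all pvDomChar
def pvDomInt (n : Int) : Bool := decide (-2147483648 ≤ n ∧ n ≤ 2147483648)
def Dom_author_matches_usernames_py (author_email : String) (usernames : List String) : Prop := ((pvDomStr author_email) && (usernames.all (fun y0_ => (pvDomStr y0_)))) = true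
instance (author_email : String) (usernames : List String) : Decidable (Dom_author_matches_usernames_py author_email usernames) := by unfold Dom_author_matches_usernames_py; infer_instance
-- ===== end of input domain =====

-- B changes: instead of A's linear scan comparing every normalized username to the three
-- author variants, B sorts the normalized usernames once and binary-searches each variant
-- (objective: alternative; no speed claim).
-- '(s or "")' on a Python str is the identity (it yields "" exactly when s is ""), so it is ported as s itself.

-- ===== PORT A =====
-- normalized form used throughout: (s).strip().lower()
def pvNorm (s : String) : String := PySem.Str.lower (PySem.Str.strip s)

-- email.split("@", 1)[0]: split with a non-empty separator always returns a non-empty list,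
-- so headD "" is exact here.
def pvLocal (email : String) : String := ((PySem.Str.splitMax? email "@" 1).getD []).headD ""

-- port of _extract_git_username (shared helper of both Pythons)
def extractGitUsername (email : String) : String :=
  let locl := pvNorm (pvLocal email)
  if PySem.Str.isIn "+" locl then
    -- local.split("+", 1)[1]: the index-1 element exists because "+" occurs in locl, so getD is exact
    let suffix := PySem.Str.strip (((PySem.Str.splitMax? locl "+" 1).getD []).getD 1 "")
    if suffix ≠ "" then suffix else locl
  else locl

-- the 'for candidate in usernames' loop of A
def amLoop (email locl ex : String) : List String → Bool
  | [] => false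
  | u :: rest =>
    let c := pvNorm u
    if c = "" then amLoop email locl ex rest
    else if c = email ∨ c = locl ∨ c = ex then true
    else amLoop email locl ex rest

def author_matches_usernames_py (author_email : String) (usernames : List String) : Bool :=
  if usernames = [] then true
  else
    let email := pvNorm author_email
    if email = "" then false
    else amLoop email (pvLocal email) (extractGitUsername email) usernames

-- ===== PORT B =====
-- the 'while lo < hi' lower-bound loop of B's found(t)
def bsLoop (cands : List String) (t : String) (lo hi : Nat) : Nat :=
  if h : lo < hi then
    if cands.getD ((lo + hi) / 2) "" < t then bsLoop cands t ((lo + hi) / 2 + 1) hi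
    else bsLoop cands t lo ((lo + hi) / 2)
  else lo
termination_by hi - lo
decreasing_by
  · omega
  · omega

-- B's found(t): binary search then check the landing element
def bsFound (cands : List String) (t : String) : Bool :=
  let lo := bsLoop cands t 0 cands.length
  decide (lo < cands.length) && (cands.getD lo "" == t)

def author_matches_usernames_py_alt (author_email : String) (usernames : List String) : Bool :=
  if usernames = [] then true
  else
    let email := pvNorm author_email
    if email = "" then false
    else
      -- cands = sorted(c for u in usernames if (c := (u or "").strip().lower()))
      let cands := PySem.List.sorted ((usernames.map pvNorm).filter (fun c => c ≠ "")) (fun x => x) false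
      bsFound cands email || bsFound cands (pvLocal email) || bsFound cands (extractGitUsername email)

-- ===== PRECONDITION & SPEC =====
def Spec_author_matches_usernames_py (author_email : String) (usernames : List String) (out : Bool) : Prop := out = author_matches_usernames_py_alt author_email usernames
instance (author_email : String) (usernames : List String) (out : Bool) : Decidable (Spec_author_matches_usernames_py author_email usernames out) := by unfold Spec_author_matches_usernames_py; infer_instance

-- ===== CLAIM (what is proved, stated in full; the proofs are below) =====
def Claim_equal_author_matches_usernames_py : Prop := ∀ (author_email : String) (usernames : List String), Dom_author_matches_usernames_py author_email usernames → Spec_author_matches_usernames_py author_email usernames (author_matches_usernames_py author_email usernames)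

-- ===== LEMMAS AND PROOFS =====
theorem amLoop_iff (email locl ex : String) (us : List String) :
    amLoop email locl ex us = true ↔
      ∃ u ∈ us, pvNorm u ≠ "" ∧ (pvNorm u = email ∨ pvNorm u = locl ∨ pvNorm u = ex) := by
  induction us with
  | nil => simp [amLoop]
  | cons u rest ih =>
    simp only [amLoop]
    split_ifs with h1 h2 <;> simp_all

-- monotone access into a (·≤·)-pairwise list
theorem sorted_mono (cands : List String) (hs : cands.Pairwise (· ≤ ·))
    {i j : Nat} (hij : i ≤ j) (hj : j < cands.length) : cands[i] ≤ cands[j] := by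
  rcases Nat.lt_or_ge i j with h | h
  · exact (List.pairwise_iff_getElem.1 hs) i j (Nat.lt_of_le_of_lt (Nat.le_of_lt h) hj) hj h
  · have : i = j := Nat.le_antisymm hij h
    subst this; exact le_refl _

-- the lower-bound invariant of bsLoop
theorem bsLoop_spec (cands : List String) (t : String) (hs : cands.Pairwise (· ≤ ·)) :
    ∀ n lo hi, hi - lo = n → lo ≤ hi → hi ≤ cands.length →
      (∀ i, i < lo → ∀ h : i < cands.length, cands[i] < t) →
      (∀ i, hi ≤ i → ∀ h : i < cands.length, t ≤ cands[i]) →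
      (∀ i, i < bsLoop cands t lo hi → ∀ h : i < cands.length, cands[i] < t) ∧
      (∀ i, bsLoop cands t lo hi ≤ i → ∀ h : i < cands.length, t ≤ cands[i]) ∧
      bsLoop cands t lo hi ≤ cands.length := by
  intro n
  induction n using Nat.strong_induction_on with
  | _ n ih =>
    intro lo hi hn hlohi hhi hlow hhigh
    rw [bsLoop]
    by_cases h : lo < hi
    · rw [dif_pos h]
      have hmidlt : (lo + hi) / 2 < hi := by omega
      have hmidge : lo ≤ (lo + hi) / 2 := by omega
      have hmidlen : (lo + hi) / 2 < cands.length := Nat.lt_of_lt_of_le hmidlt hhi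
      rw [List.getD_eq_getElem cands "" hmidlen]
      by_cases hc : cands[(lo + hi) / 2] < t
      · rw [if_pos hc]
        refine ih (hi - ((lo + hi) / 2 + 1)) (by omega) _ _ rfl (by omega) hhi ?_ hhigh
        intro i hi' h'
        rcases Nat.lt_or_ge i lo with hil | hil
        · exact hlow i hil h'
        · exact lt_of_le_of_lt (sorted_mono cands hs (by omega) hmidlen) hc
      · rw [if_neg hc]
        refine ih ((lo + hi) / 2 - lo) (by omega) _ _ rfl (by omega) (le_of_lt hmidlen) hlow ?_
        intro i hi' h'
        exact le_trans (not_lt.1 hc) (sorted_mono cands hs hi' h')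
    · rw [dif_neg h]
      have : lo = hi := Nat.le_antisymm hlohi (not_lt.1 h)
      subst this
      exact ⟨hlow, hhigh, hhi⟩

-- B's found(t) decides membership in a sorted list
theorem bsFound_iff (cands : List String) (t : String) (hs : cands.Pairwise (· ≤ ·)) :
    bsFound cands t = true ↔ t ∈ cands := by
  obtain ⟨hlow, hhigh, hle⟩ :=
    bsLoop_spec cands t hs (cands.length - 0) 0 cands.length rfl (Nat.zero_le _) (le_refl _)
      (fun i hi _ => absurd hi (Nat.not_lt_zero i)) (fun i hi h => absurd h (by omega))
  set r := bsLoop cands t 0 cands.length with hr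
  constructor
  · intro hb
    simp only [bsFound, ← hr, Bool.and_eq_true, decide_eq_true_eq, beq_iff_eq] at hb
    obtain ⟨hrlen, heq⟩ := hb
    rw [List.getD_eq_getElem cands "" hrlen] at heq
    exact heq ▸ List.getElem_mem hrlen
  · intro hmem
    obtain ⟨j, hj, hjt⟩ := List.mem_iff_getElem.1 hmem
    have hrj : r ≤ j := by
      by_contra hcon
      exact absurd (hjt ▸ hlow j (not_le.1 hcon) hj) (lt_irrefl t)
    have hrlen : r < cands.length := Nat.lt_of_le_of_lt hrj hj
    have h1 : t ≤ cands[r] := hhigh r (le_refl r) hrlen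
    have h2 : cands[r] ≤ t := hjt ▸ sorted_mono cands hs hrj hj
    simp only [bsFound, ← hr, Bool.and_eq_true, decide_eq_true_eq, beq_iff_eq]
    exact ⟨hrlen, by rw [List.getD_eq_getElem cands "" hrlen]; exact le_antisymm h2 h1⟩

-- membership in B's sorted candidate list
theorem mem_cands_iff (us : List String) (t : String) :
    t ∈ PySem.List.sorted ((us.map pvNorm).filter (fun c => c ≠ "")) (fun x => x) false ↔
      ∃ u ∈ us, pvNorm u ≠ "" ∧ pvNorm u = t := by
  rw [PySem.List.mem_sorted, List.mem_filter]
  simp only [List.mem_map, decide_eq_true_eq]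
  constructor
  · rintro ⟨⟨u, hu, rfl⟩, hne⟩
    exact ⟨u, hu, hne, rfl⟩
  · rintro ⟨u, hu, hne, rfl⟩
    exact ⟨⟨u, hu, rfl⟩, hne⟩

-- A's scan equals B's sort-then-binary-search
theorem loop_eq_search (e l x : String) (us : List String) :
    amLoop e l x us =
      (bsFound (PySem.List.sorted ((us.map pvNorm).filter (fun c => c ≠ "")) (fun x => x) false) e ||
       bsFound (PySem.List.sorted ((us.map pvNorm).filter (fun c => c ≠ "")) (fun x => x) false) l ||
       bsFound (PySem.List.sorted ((us.map pvNorm).filter (fun c => c ≠ "")) (fun x => x) false) x) := by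
  have hs : (PySem.List.sorted ((us.map pvNorm).filter (fun c => c ≠ "")) (fun x => x) false).Pairwise (· ≤ ·) :=
    PySem.List.sorted_pairwise _ _
  rw [Bool.eq_iff_iff, amLoop_iff]
  simp only [Bool.or_eq_true, bsFound_iff _ _ hs, mem_cands_iff]
  constructor
  · rintro ⟨u, hu, hne, (h | h | h)⟩
    · exact Or.inl (Or.inl ⟨u, hu, hne, h⟩)
    · exact Or.inl (Or.inr ⟨u, hu, hne, h⟩)
    · exact Or.inr ⟨u, hu, hne, h⟩
  · rintro ((⟨u, hu, hne, h⟩ | ⟨u, hu, hne, h⟩) | ⟨u, hu, hne, h⟩)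
    · exact ⟨u, hu, hne, Or.inl h⟩
    · exact ⟨u, hu, hne, Or.inr (Or.inl h)⟩
    · exact ⟨u, hu, hne, Or.inr (Or.inr h)⟩

-- ===== VERDICT (by name: the statement is the Claim_ definition above) =====
theorem author_matches_usernames_py_spec : Claim_equal_author_matches_usernames_py := by
  intro author_email usernames _
  unfold Spec_author_matches_usernames_py author_matches_usernames_py author_matches_usernames_py_alt
  by_cases h1 : usernames = []
  · rw [if_pos h1, if_pos h1]
  · rw [if_neg h1, if_neg h1]
    by_cases h2 : pvNorm author_email = ""
    · rw [if_pos h2, if_pos h2]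
    · rw [if_neg h2, if_neg h2]
      exact loop_eq_search _ _ _ _
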